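-- pv_equiv track=rewrite | github.com/xmarcosx/md2slack | src/md2slack/chunker.py | find_code_block_boundaries
-- ===== SOURCE A (Python) =====
-- def find_code_block_boundaries(content: str) -> list[tuple[int, int]]:
--     """Find all code block start/end positions in the content.
--
--     Code blocks are delimited by triple backticks (```) on their own lines.
--
--     Args:
--         content: The content to scan
--
--     Returns:
--         List of (start, end) tuples for each code block
--     """
--     boundaries: list[tuple[int, int]] = []
--     in_block = False
--     block_start = 0
--
--     lines = content.split("\n")
--     pos = 0
--
--     for line in lines:
--         line_stripped = line.strip()
--         if line_stripped.startswith("```"):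
--             if not in_block:
--                 # Starting a code block
--                 in_block = True
--                 block_start = pos
--             else:
--                 # Ending a code block
--                 in_block = False
--                 block_end = pos + len(line)
--                 boundaries.append((block_start, block_end))
--
--         pos += len(line) + 1  # +1 for newline
--
--     # Handle unclosed code block
--     if in_block:
--         boundaries.append((block_start, len(content)))
--
--     return boundaries
-- ===== SOURCE B (Python) =====
-- def find_code_block_boundaries(content: str) -> list[tuple[int, int]]:
--     """Find all code block start/end positions in the content."""
--     # Pass 1: collect the (start, end) span of every fence line.
--     fences: list[tuple[int, int]] = []
--     pos = 0
--     for line in content.split("\n"):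
--         if line.strip().startswith("```"):
--             fences.append((pos, pos + len(line)))
--         pos += len(line) + 1
--     # Pass 2: pair fences up; an unpaired trailing fence runs to end of content.
--     boundaries: list[tuple[int, int]] = []
--     i = 0
--     while i + 1 < len(fences):
--         boundaries.append((fences[i][0], fences[i + 1][1]))
--         i += 2
--     if i < len(fences):
--         boundaries.append((fences[i][0], len(content)))
--     return boundaries
-- ===== Notes on version B (the rewrite author's own statement) =====
-- stated objective: alternative
-- what changed: Replaces A's stateful single loop (in_block flag, block_start carried across iterations) by a two-phase decomposition: one pass collecting all fence-line spans, then a second pass pairing consecutive fences (unpaired trailing fence closed at len(content)).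
import Mathlib
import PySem

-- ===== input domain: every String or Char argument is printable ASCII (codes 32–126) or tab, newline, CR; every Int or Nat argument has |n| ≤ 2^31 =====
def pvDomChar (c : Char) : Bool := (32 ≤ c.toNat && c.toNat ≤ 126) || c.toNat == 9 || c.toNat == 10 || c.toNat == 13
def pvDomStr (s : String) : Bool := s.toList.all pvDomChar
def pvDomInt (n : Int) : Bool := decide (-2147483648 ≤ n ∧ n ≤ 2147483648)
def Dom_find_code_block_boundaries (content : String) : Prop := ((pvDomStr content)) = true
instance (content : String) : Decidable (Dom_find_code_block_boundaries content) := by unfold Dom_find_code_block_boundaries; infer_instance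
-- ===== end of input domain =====

-- B replaces A's stateful single loop (in_block flag carried across lines) by a two-phase
-- decomposition: collect every fence line's span, then pair consecutive fences (alternative, same cost).

-- ===== PORT A =====
-- A's for-loop over lines with state (in_block, block_start, pos, boundaries), plus the
-- trailing unclosed-block fix-up (the `[]` case). Strings handled on the List Char side
-- via PySem.Chars (exact Python semantics for split/strip/startswith).
def loopA (lines : List (List Char)) (pos : Int) (inb : Bool) (bs : Int)
    (acc : List (Int × Int)) (clen : Int) : List (Int × Int) :=
  match lines with
  | [] => if inb then acc ++ [(bs, clen)] else acc
  | l :: rest =>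
    if PySem.Chars.startswith (PySem.Chars.strip l) ['`', '`', '`'] then
      if !inb then
        loopA rest (pos + (l.length : Int) + 1) true pos acc clen
      else
        loopA rest (pos + (l.length : Int) + 1) false bs (acc ++ [(bs, pos + (l.length : Int))]) clen
    else
      loopA rest (pos + (l.length : Int) + 1) inb bs acc clen

def find_code_block_boundaries (content : String) : List (Int × Int) :=
  loopA (PySem.Chars.splitOn content.toList ['\n']) 0 false 0 [] (content.toList.length : Int)

-- ===== PORT B =====
-- Pass 1: collect (pos, pos + len(line)) for every fence line.
def collectFences (lines : List (List Char)) (pos : Int) : List (Int × Int) :=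
  match lines with
  | [] => []
  | l :: rest =>
    if PySem.Chars.startswith (PySem.Chars.strip l) ['`', '`', '`'] then
      (pos, pos + (l.length : Int)) :: collectFences rest (pos + (l.length : Int) + 1)
    else
      collectFences rest (pos + (l.length : Int) + 1)

-- Pass 2: Source B's while-loop pairing fences two at a time; one leftover fence closes at clen.
def pairLoop (fences : List (Int × Int)) (clen : Int) : List (Int × Int) :=
  match fences with
  | f :: g :: rest => (f.1, g.2) :: pairLoop rest clen
  | [f] => [(f.1, clen)]
  | [] => []

def find_code_block_boundaries_alt (content : String) : List (Int × Int) :=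
  pairLoop (collectFences (PySem.Chars.splitOn content.toList ['\n']) 0) (content.toList.length : Int)

-- ===== PRECONDITION & SPEC =====
def Spec_find_code_block_boundaries (content : String) (out : List (Int × Int)) : Prop := out = find_code_block_boundaries_alt content
instance (content : String) (out : List (Int × Int)) : Decidable (Spec_find_code_block_boundaries content out) := by unfold Spec_find_code_block_boundaries; infer_instance

-- ===== CLAIM (what is proved, stated in full; the proofs are below) =====
def Claim_equal_find_code_block_boundaries : Prop := ∀ (content : String), Dom_find_code_block_boundaries content → Spec_find_code_block_boundaries content (find_code_block_boundaries content)

-- ===== LEMMAS AND PROOFS =====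

-- 'pairLoop on fences where the first fence is already open with start bs': its end component
-- is never read, so A's in_block=true state corresponds to this.
def pairOpen (bs : Int) (fences : List (Int × Int)) (clen : Int) : List (Int × Int) :=
  match fences with
  | [] => [(bs, clen)]
  | g :: rest => (bs, g.2) :: pairLoop rest clen

theorem pairLoop_cons (f : Int × Int) (fs : List (Int × Int)) (clen : Int) :
    pairLoop (f :: fs) clen = pairOpen f.1 fs clen := by
  cases fs <;> simp [pairLoop, pairOpen]

theorem loopA_eq (lines : List (List Char)) :
    ∀ (pos bs clen : Int) (acc : List (Int × Int)),
      loopA lines pos false bs acc clen = acc ++ pairLoop (collectFences lines pos) clen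
      ∧ loopA lines pos true bs acc clen = acc ++ pairOpen bs (collectFences lines pos) clen := by
  induction lines with
  | nil => intro pos bs clen acc; simp [loopA, collectFences, pairLoop, pairOpen]
  | cons l rest ih =>
    intro pos bs clen acc
    by_cases h : PySem.Chars.startswith (PySem.Chars.strip l) ['`', '`', '`']
    · constructor
      · rw [show loopA (l :: rest) pos false bs acc clen
              = loopA rest (pos + (l.length : Int) + 1) true pos acc clen by simp [loopA, h]]
        rw [(ih (pos + (l.length : Int) + 1) pos clen acc).2]
        simp [collectFences, h, pairLoop_cons]
      · rw [show loopA (l :: rest) pos true bs acc clen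
              = loopA rest (pos + (l.length : Int) + 1) false bs
                  (acc ++ [(bs, pos + (l.length : Int))]) clen by simp [loopA, h]]
        rw [(ih (pos + (l.length : Int) + 1) bs clen (acc ++ [(bs, pos + (l.length : Int))])).1]
        simp [collectFences, h, pairOpen]
    · have e1 : loopA (l :: rest) pos false bs acc clen
          = loopA rest (pos + (l.length : Int) + 1) false bs acc clen := by simp [loopA, h]
      have e2 : loopA (l :: rest) pos true bs acc clen
          = loopA rest (pos + (l.length : Int) + 1) true bs acc clen := by simp [loopA, h]
      rw [e1, e2]
      have := ih (pos + (l.length : Int) + 1) bs clen acc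
      simpa [collectFences, h] using this

-- ===== VERDICT (by name: the statement is the Claim_ definition above) =====
theorem find_code_block_boundaries_spec : Claim_equal_find_code_block_boundaries := by
  intro content _
  unfold Spec_find_code_block_boundaries find_code_block_boundaries find_code_block_boundaries_alt
  simpa using (loopA_eq (PySem.Chars.splitOn content.toList ['\n']) 0 0 (content.toList.length : Int) []).1
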